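-- pv_equiv track=rewrite | github.com/scorixear/EverybodyCodes | 2024/16/2.py | get_coins
-- ===== SOURCE A (Python) =====
-- def get_coins(cat_faces: list[str]) -> int:
--     total = "".join([face[0] + face[2] for face in cat_faces])
--     occurences = dict()
--     for char in total:
--         if char not in occurences:
--             occurences[char] = 0
--         occurences[char] += 1
--     total = 0
--     for val in occurences.values():
--         if val >= 3:
--             total += val - 2
--     return total
-- ===== SOURCE B (Python) =====
-- def get_coins(cat_faces: list[str]) -> int:
--     # sort the first/third characters, then scan maximal runs of equal chars
--     chars = sorted(c for face in cat_faces for c in (face[0], face[2]))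
--     total = 0
--     prev = None
--     run = 0
--     for c in chars:
--         if c == prev:
--             run += 1
--         else:
--             if run > 2:
--                 total += run - 2
--             prev = c
--             run = 1
--     if run > 2:
--         total += run - 2
--     return total
-- ===== Notes on version B (the rewrite author's own statement) =====
-- stated objective: alternative
-- what changed: Replaces the dict frequency tally plus a second pass over its values by sorting the extracted characters and scanning maximal runs in one pass, accumulating run length minus two for runs longer than two.
import Mathlib
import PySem

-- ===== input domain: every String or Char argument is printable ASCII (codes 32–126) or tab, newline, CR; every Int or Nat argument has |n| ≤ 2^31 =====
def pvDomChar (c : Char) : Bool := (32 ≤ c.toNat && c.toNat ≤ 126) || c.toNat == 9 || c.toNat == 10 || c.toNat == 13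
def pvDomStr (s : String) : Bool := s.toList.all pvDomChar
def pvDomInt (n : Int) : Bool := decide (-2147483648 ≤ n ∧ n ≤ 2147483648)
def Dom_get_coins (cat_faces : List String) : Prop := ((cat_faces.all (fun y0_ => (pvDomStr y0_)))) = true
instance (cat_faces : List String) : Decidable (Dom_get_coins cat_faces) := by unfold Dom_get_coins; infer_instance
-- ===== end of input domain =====

-- B replaces A's dict tally + second pass over the values by sorting the extracted
-- characters and scanning maximal runs in one pass (objective: alternative algorithm).

-- ===== PORT A =====
-- the characters face[0], face[2]; exact under Pre_ (every face has length ≥ 3)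
def pvFaceChars (face : String) : List Char :=
  [PySem.List.pyGetD face.toList 0 ' ', PySem.List.pyGetD face.toList 2 ' ']

def get_coins (cat_faces : List String) : Int :=
  let total : List Char := (cat_faces.map pvFaceChars).flatten
  let occ : PySem.Dict Char Int := total.foldl
    (fun d c =>
      let d1 := if d.contains c then d else d.insert c 0
      d1.insert c (d1.getD c 0 + 1)) PySem.Dict.empty
  occ.values.foldl (fun t v => if 3 ≤ v then t + (v - 2) else t) 0

-- ===== PORT B =====
-- excess of a run of length k over 2 (the `if run > 2: total += run - 2` step)
def pvExcess (k : Nat) : Int := if 2 < k then (k : Int) - 2 else 0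

-- state (prev, run, total) of Source B's loop over the sorted characters
def pvStep (st : Option Char × Nat × Int) (c : Char) : Option Char × Nat × Int :=
  if some c = st.1 then (st.1, st.2.1 + 1, st.2.2)
  else (some c, 1, st.2.2 + pvExcess st.2.1)

def get_coins_alt (cat_faces : List String) : Int :=
  let chars := PySem.List.sorted ((cat_faces.map pvFaceChars).flatten) (fun c => c) false
  let s := chars.foldl pvStep (none, 0, 0)
  s.2.2 + pvExcess s.2.1

-- ===== PRECONDITION & SPEC =====
-- Pre_: A indexes face[0] and face[2] and raises IndexError on any face shorter than 3 characters (B raises there too).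
def Pre_get_coins (cat_faces : List String) : Prop :=
  ∀ f ∈ cat_faces, 3 ≤ f.toList.length
instance (cat_faces : List String) : Decidable (Pre_get_coins cat_faces) := by
  unfold Pre_get_coins; infer_instance

def pvWitness_get_coins : List String := ["abc", "aba"]

def Spec_get_coins (cat_faces : List String) (out : Int) : Prop := out = get_coins_alt cat_faces
instance (cat_faces : List String) (out : Int) : Decidable (Spec_get_coins cat_faces out) := by unfold Spec_get_coins; infer_instance

-- ===== CLAIM (what is proved, stated in full; the proofs are below) =====
def Claim_equal_get_coins : Prop := ∀ (cat_faces : List String), Dom_get_coins cat_faces → Pre_get_coins cat_faces → Spec_get_coins cat_faces (get_coins cat_faces)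

-- ===== LEMMAS AND PROOFS =====

-- the common value both programs compute: sum over the distinct characters of the excess of their multiplicity
def pvS (m : List Char) : Int :=
  ((PySem.Set.ofList m).map (fun c => pvExcess (m.count c))).sum

lemma pvS_perm {xs ys : List Char} (h : xs.Perm ys) : pvS xs = pvS ys := by
  unfold pvS
  have hp : (PySem.Set.ofList xs).Perm (PySem.Set.ofList ys) := by
    rw [List.perm_ext_iff_of_nodup (PySem.Set.nodup_ofList xs) (PySem.Set.nodup_ofList ys)]
    intro a; rw [PySem.Set.mem_ofList, PySem.Set.mem_ofList]; exact h.mem_iff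
  calc ((PySem.Set.ofList xs).map (fun c => pvExcess (xs.count c))).sum
      = ((PySem.Set.ofList xs).map (fun c => pvExcess (ys.count c))).sum := by
        simp only [h.count_eq]
    _ = ((PySem.Set.ofList ys).map (fun c => pvExcess (ys.count c))).sum :=
        (hp.map _).sum_eq

lemma pvS_cons (x : Char) (xs : List Char) :
    pvS (x :: xs) = pvExcess (xs.count x + 1) + pvS (xs.filter (fun c => c != x)) := by
  have hnd : (x :: PySem.Set.ofList (xs.filter (fun c => c != x))).Nodup := by
    refine List.nodup_cons.mpr ⟨?_, PySem.Set.nodup_ofList _⟩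
    intro hx
    have := (List.mem_filter.mp ((PySem.Set.mem_ofList _ _).mp hx)).2
    simp at this
  have hp : (PySem.Set.ofList (x :: xs)).Perm
      (x :: PySem.Set.ofList (xs.filter (fun c => c != x))) := by
    rw [List.perm_ext_iff_of_nodup (PySem.Set.nodup_ofList _) hnd]
    intro a
    by_cases ha : a = x
    · subst ha; simp [PySem.Set.mem_ofList]
    · simp [PySem.Set.mem_ofList, List.mem_filter, ha]
  unfold pvS
  rw [(hp.map _).sum_eq, List.map_cons, List.sum_cons, List.count_cons_self]
  congr 1
  congr 1
  apply List.map_congr_left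
  intro c hc
  have hmem := (PySem.Set.mem_ofList _ _).mp hc
  have hne : (c != x) = true := (List.mem_filter.mp hmem).2
  have hne' : c ≠ x := by simpa using hne
  have h1 : List.count c (List.filter (fun c => c != x) xs) = List.count c xs :=
    List.count_filter (p := fun y => y != x) hne
  rw [h1, List.count_cons_of_ne (Ne.symm hne')]

lemma pvScan_sorted : ∀ (l : List Char) (c : Char) (k : Nat) (t : Int),
    l.Pairwise (· ≤ ·) → (∀ x ∈ l, c ≤ x) →
    (l.foldl pvStep (some c, k, t)).2.2 + pvExcess (l.foldl pvStep (some c, k, t)).2.1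
      = t + pvExcess (k + l.count c) + pvS (l.filter (fun y => y != c))
  | [], c, k, t, _, _ => by simp [pvS]
  | x :: xs, c, k, t, hpw, hle => by
    have hx : ∀ y ∈ xs, x ≤ y := (List.pairwise_cons.mp hpw).1
    have hpw' : xs.Pairwise (· ≤ ·) := (List.pairwise_cons.mp hpw).2
    have hcx : c ≤ x := hle x (List.mem_cons_self ..)
    by_cases hxc : x = c
    · subst hxc
      have hle' : ∀ y ∈ xs, x ≤ y := hx
      have hstep : pvStep (some x, k, t) x = (some x, k + 1, t) := by
        simp [pvStep]
      rw [List.foldl_cons, hstep, pvScan_sorted xs x (k + 1) t hpw' hle']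
      have h1 : k + 1 + xs.count x = k + (x :: xs).count x := by
        rw [List.count_cons_self]; omega
      have h2 : (x :: xs).filter (fun y => y != x) = xs.filter (fun y => y != x) := by
        simp
      rw [h1, h2]
    · have hclt : c < x := lt_of_le_of_ne hcx (fun h => hxc h.symm)
      have hnotmem : c ∉ x :: xs := by
        intro hmem
        rcases List.mem_cons.mp hmem with h | h
        · exact hxc h.symm
        · exact absurd (lt_of_lt_of_le hclt (hx c h)) (lt_irrefl c)
      have hstep : pvStep (some c, k, t) x = (some x, 1, t + pvExcess k) := by
        unfold pvStep
        rw [if_neg (fun h => hxc (Option.some.inj h))]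
      rw [List.foldl_cons, hstep, pvScan_sorted xs x 1 (t + pvExcess k) hpw' hx]
      have hcount : (x :: xs).count c = 0 := List.count_eq_zero.mpr hnotmem
      have hfilter : (x :: xs).filter (fun y => y != c) = x :: xs :=
        List.filter_eq_self.mpr (fun a ha => by
          simp only [bne_iff_ne, ne_eq]
          intro h; exact hnotmem (h ▸ ha))
      rw [hcount, Nat.add_zero, hfilter, pvS_cons]
      have : 1 + xs.count x = xs.count x + 1 := by omega
      rw [this]; ring

lemma get_coins_alt_eq_pvS (cat_faces : List String) :
    get_coins_alt cat_faces = pvS ((cat_faces.map pvFaceChars).flatten) := by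
  unfold get_coins_alt
  cases h : PySem.List.sorted ((cat_faces.map pvFaceChars).flatten) (fun c => c) false with
  | nil =>
    have h0 : (cat_faces.map pvFaceChars).flatten = [] :=
      (PySem.List.sorted_eq_nil_iff _ _ _).mp h
    rw [h0] at h ⊢
    simp [pvS, pvExcess]
  | cons c rest =>
    have hperm := PySem.List.sorted_perm ((cat_faces.map pvFaceChars).flatten) (fun c => c) false
    rw [h] at hperm
    have hpw := PySem.List.sorted_pairwise ((cat_faces.map pvFaceChars).flatten) (fun c => c)
    rw [h] at hpw
    have hhead : ∀ x ∈ rest, c ≤ x := (List.pairwise_cons.mp hpw).1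
    have htail : rest.Pairwise (· ≤ ·) := (List.pairwise_cons.mp hpw).2
    have hstep : pvStep (none, 0, 0) c = (some c, 1, 0) := by
      simp [pvStep, pvExcess]
    show (List.foldl pvStep (none, 0, 0) (c :: rest)).2.2
        + pvExcess (List.foldl pvStep (none, 0, 0) (c :: rest)).2.1
      = pvS ((cat_faces.map pvFaceChars).flatten)
    rw [List.foldl_cons, hstep, pvScan_sorted rest c 1 0 htail hhead]
    rw [← pvS_perm hperm, pvS_cons]
    have : 1 + rest.count c = rest.count c + 1 := by omega
    rw [this]; ring

lemma get_coins_eq_pvS (cat_faces : List String) :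
    get_coins cat_faces = pvS ((cat_faces.map pvFaceChars).flatten) := by
  have hbody : (fun (d : PySem.Dict Char Int) c =>
      let d1 := if d.contains c then d else d.insert c 0
      d1.insert c (d1.getD c 0 + 1)) = fun d c => d.insert c (d.getD c 0 + 1) := by
    funext d c
    by_cases hc : d.contains c
    · simp [hc]
    · simp only [Bool.not_eq_true] at hc
      simp [hc, PySem.Dict.getD_insert_self, PySem.Dict.insert_insert_self,
        PySem.Dict.getD_of_not_contains d 0 hc]
  show (((cat_faces.map pvFaceChars).flatten).foldl
      (fun d c =>
        let d1 := if d.contains c then d else d.insert c 0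
        d1.insert c (d1.getD c 0 + 1)) PySem.Dict.empty).values.foldl
      (fun t v => if 3 ≤ v then t + (v - 2) else t) 0
    = pvS ((cat_faces.map pvFaceChars).flatten)
  rw [hbody, PySem.Dict.foldl_insert_getD_add_one_eq_counter]
  have hvals : (PySem.Dict.counter ((cat_faces.map pvFaceChars).flatten)).values
      = (PySem.Set.ofList ((cat_faces.map pvFaceChars).flatten)).map
          (fun k => ((((cat_faces.map pvFaceChars).flatten).count k : Nat) : Int)) := by
    simp only [PySem.Dict.values, PySem.Dict.items_counter, List.map_map]
    rfl
  rw [hvals]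
  have hif : (fun (t v : Int) => if 3 ≤ v then t + (v - 2) else t)
      = fun t v => t + (if 3 ≤ v then v - 2 else 0) := by
    funext t v; split_ifs <;> simp
  rw [hif, PySem.List.foldl_add, zero_add, List.map_map, pvS]
  congr 1
  apply List.map_congr_left
  intro c _
  simp only [Function.comp]
  unfold pvExcess
  by_cases h3 : 2 < ((cat_faces.map pvFaceChars).flatten).count c
  · rw [if_pos h3, if_pos (by exact_mod_cast h3)]
  · rw [if_neg h3, if_neg (by exact_mod_cast h3)]

-- ===== VERDICT (by name: the statement is the Claim_ definition above) =====
theorem get_coins_spec : Claim_equal_get_coins := by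
  intro cat_faces _ _
  unfold Spec_get_coins
  rw [get_coins_eq_pvS, get_coins_alt_eq_pvS]
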